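-- pv_equiv track=rewrite | github.com/Nahom-Derese/Competitive-Programing | Contests/A2SV/Contest VIII/F_A_Permutation_Puzzle.py | cycleLength
-- ===== SOURCE A (Python) =====
-- def cycleLength(cycle):
--     length = len(cycle)
--     for i in range(1, length + 1):
--         if length % i == 0:
--             pattern = cycle[:i]
--             if all(cycle[j:j+i] == pattern for j in range(0, length, i)):
--                 return i
--     return length
-- ===== SOURCE B (Python) =====
-- def cycleLength(cycle):
--     n = len(cycle)
--     i = 1
--     while i < n:
--         if n % i == 0 and cycle[i:] == cycle[:-i]:
--             return i
--         i += 1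
--     return n
-- ===== Notes on version B (the rewrite author's own statement) =====
-- stated objective: simpler
-- what changed: replaces A's block-by-block tiling comparison (an inner scan comparing every i-sized block with the first) by a single suffix==prefix overlap test cycle[i:] == cycle[:-i] per candidate divisor, in a plain while loop; for i dividing n the overlap condition is equivalent to the tiling condition
import Mathlib
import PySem

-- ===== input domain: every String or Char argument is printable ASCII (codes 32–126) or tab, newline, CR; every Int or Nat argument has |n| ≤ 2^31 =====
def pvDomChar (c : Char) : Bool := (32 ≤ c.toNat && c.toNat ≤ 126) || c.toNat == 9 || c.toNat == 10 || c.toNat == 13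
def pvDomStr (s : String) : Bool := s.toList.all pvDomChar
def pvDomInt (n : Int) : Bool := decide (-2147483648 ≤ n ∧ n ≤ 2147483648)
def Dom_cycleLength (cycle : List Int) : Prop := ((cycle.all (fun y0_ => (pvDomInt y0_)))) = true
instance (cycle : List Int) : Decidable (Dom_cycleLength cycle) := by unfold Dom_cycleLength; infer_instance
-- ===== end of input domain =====

-- B replaces A's inner block-by-block tiling scan with a single suffix==prefix
-- overlap test per candidate divisor, in a plain while loop (objective: simpler).

-- ===== PORT A =====
def cycleLength (cycle : List Int) : Int :=
  let length := PySem.List.len cycle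
  match (PySem.List.pyRange 1 (length + 1) 1).find? (fun i =>
      (PySem.Int.mod length i == 0) &&
      (let pattern := PySem.List.slice cycle none (some i)
       (PySem.List.pyRange 0 length i).all (fun j =>
         PySem.List.slice cycle (some j) (some (j + i)) == pattern))) with
  | some i => i
  | none => length

-- ===== PORT B =====
-- the 'while i < n' loop of Source B, i counting up from 1
def cycleLengthScan (cycle : List Int) (n : Nat) (i : Nat) : Int :=
  if i < n then
    if (PySem.Int.mod (n : Int) (i : Int) == 0) &&
       (PySem.List.slice cycle (some (i : Int)) none ==
        PySem.List.slice cycle none (some (-(i : Int)))) then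
      (i : Int)
    else
      cycleLengthScan cycle n (i + 1)
  else
    (n : Int)
termination_by n - i

def cycleLength_alt (cycle : List Int) : Int :=
  cycleLengthScan cycle cycle.length 1

-- ===== PRECONDITION & SPEC =====
def Spec_cycleLength (cycle : List Int) (out : Int) : Prop := out = cycleLength_alt cycle
instance (cycle : List Int) (out : Int) : Decidable (Spec_cycleLength cycle out) := by unfold Spec_cycleLength; infer_instance

-- ===== CLAIM (what is proved, stated in full; the proofs are below) =====
def Claim_equal_cycleLength : Prop := ∀ (cycle : List Int), Dom_cycleLength cycle → Spec_cycleLength cycle (cycleLength cycle)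

-- ===== LEMMAS AND PROOFS =====

-- a list tiled by m copies of its first block is the flatten of replicates
theorem pvTile_eq_flatten (t : List Int) (i' : Nat) :
    ∀ (m : Nat) (l : List Int), l.length = m * i' →
    (∀ k < m, (l.drop (k * i')).take i' = t) →
    l = (List.replicate m t).flatten := by
  intro m
  induction m with
  | zero =>
    intro l hl _
    simpa using List.eq_nil_of_length_eq_zero (by simpa using hl)
  | succ m ih =>
    intro l hl hb
    have h0 : l.take i' = t := by simpa using hb 0 (Nat.succ_pos m)
    have hrest : l.drop i' = (List.replicate m t).flatten := by
      apply ih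
      · simp only [List.length_drop, hl]; ring_nf; omega
      · intro k hk
        have h1 := hb (k + 1) (by omega)
        rw [List.drop_drop]
        convert h1 using 3
        ring
    calc l = l.take i' ++ l.drop i' := (List.take_append_drop _ _).symm
    _ = t ++ (List.replicate m t).flatten := by rw [h0, hrest]
    _ = (List.replicate (m+1) t).flatten := by simp [List.replicate_succ]

-- tiling (A's check) implies rotation self-match
theorem pvTiling_rotate (cycle : List Int) (i' : Nat) (hi : 0 < i')
    (hdvd : i' ∣ cycle.length)
    (hb : ∀ k, k * i' < cycle.length → (cycle.drop (k * i')).take i' = cycle.take i') :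
    cycle.rotate i' = cycle := by
  obtain ⟨m, hm⟩ := hdvd
  rcases Nat.eq_zero_or_pos m with rfl | hmpos
  · have hnil : cycle = [] := List.eq_nil_of_length_eq_zero (by omega)
    simp [hnil]
  have hin : i' ≤ cycle.length := by nlinarith
  set t := cycle.take i' with htdef
  have ht : t.length = i' := by simp only [htdef, List.length_take]; omega
  have hfl : cycle = (List.replicate m t).flatten := by
    apply pvTile_eq_flatten t i' m cycle (by rw [hm, Nat.mul_comm])
    intro k hk
    exact hb k (by nlinarith)
  have hdrop : cycle.drop i' = (List.replicate (m - 1) t).flatten := by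
    conv_lhs => rw [hfl, show m = (m-1)+1 by omega, List.replicate_succ, List.flatten_cons, ← ht]
    exact List.drop_left ..
  rw [List.rotate_eq_drop_append_take hin, hdrop, show cycle.take i' = t from rfl]
  conv_rhs => rw [hfl, show m = (m-1)+1 by omega, List.replicate_succ']
  simp

-- given i' ∣ n, the suffix==prefix overlap is equivalent to the tiling condition
theorem pvOverlap_iff (cycle : List Int) (i' : Nat) (hi : 0 < i') (hin : i' ≤ cycle.length)
    (hdvd : i' ∣ cycle.length) :
    (cycle.drop i' = cycle.take (cycle.length - i')) ↔
    (∀ k, k * i' < cycle.length → (cycle.drop (k * i')).take i' = cycle.take i') := by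
  constructor
  · intro hov k
    induction k with
    | zero => intro _; simp
    | succ k ih =>
      intro hk
      have hk' : k * i' < cycle.length := by nlinarith
      obtain ⟨m, hm⟩ := hdvd
      have hkm : k + 1 < m := by nlinarith
      have h2 : k * i' + 2 * i' ≤ cycle.length := by nlinarith
      have hle : i' ≤ cycle.length - i' - k * i' := by
        generalize hp : k * i' = p at h2 ⊢; omega
      have h1 : cycle.drop ((k+1) * i') = (cycle.drop i').drop (k * i') := by
        rw [List.drop_drop]; ring_nf
      have h2 : (cycle.drop i').drop (k * i') = (cycle.drop (k * i')).take (cycle.length - i' - k * i') := by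
        rw [hov, List.drop_take]
      rw [h1, h2, List.take_take, Nat.min_eq_left hle]
      exact ih hk'
  · intro hb
    have hrot : cycle.rotate i' = cycle := pvTiling_rotate cycle i' hi hdvd hb
    have h : cycle.drop i' ++ cycle.take i' = cycle := by
      rw [← List.rotate_eq_drop_append_take hin]; exact hrot
    have h3 : (cycle.drop i' ++ cycle.take i').take (cycle.drop i').length = cycle.drop i' :=
      List.take_left
    rw [h, List.length_drop] at h3
    exact h3.symm

-- A's boolean test, characterised as divisibility plus tiling
theorem pvP_iff (cycle : List Int) (i' : Nat) (hi : 0 < i') :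
    (((PySem.Int.mod ((cycle.length : Int)) ((i' : Nat) : Int) == 0) &&
      (PySem.List.pyRange 0 (cycle.length : Int) ((i' : Nat) : Int)).all (fun j =>
         PySem.List.slice cycle (some j) (some (j + ((i' : Nat) : Int))) ==
           PySem.List.slice cycle none (some ((i' : Nat) : Int)))) = true)
      ↔ (i' ∣ cycle.length ∧
         ∀ k, k * i' < cycle.length → (cycle.drop (k * i')).take i' = cycle.take i') := by
  rw [Bool.and_eq_true]
  have hmodiff : ((PySem.Int.mod ((cycle.length : Int)) ((i' : Nat) : Int) == 0) = true)
      ↔ i' ∣ cycle.length := by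
    rw [PySem.Int.mod_natCast, beq_iff_eq]
    exact_mod_cast Nat.dvd_iff_mod_eq_zero.symm
  constructor
  · rintro ⟨hmod, hall⟩
    refine ⟨hmodiff.mp hmod, fun k hk => ?_⟩
    simp only [List.all_eq_true] at hall
    have hmem : ((k * i' : Nat) : Int) ∈ PySem.List.pyRange 0 (cycle.length : Int) ((i' : Nat) : Int) := by
      rw [PySem.List.mem_pyRange_iff_of_pos (by exact_mod_cast hi)]
      refine ⟨by positivity, by exact_mod_cast hk, ?_⟩
      simp
    have hthis := hall _ hmem
    rw [PySem.List.slice_natCast_add, PySem.List.slice_to_natCast, beq_iff_eq] at hthis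
    exact hthis
  · rintro ⟨hdvd, hb⟩
    refine ⟨hmodiff.mpr hdvd, ?_⟩
    simp only [List.all_eq_true]
    intro j hj
    rw [PySem.List.mem_pyRange_iff_of_pos (by exact_mod_cast hi)] at hj
    obtain ⟨h0, hlt, hdj⟩ := hj
    rw [sub_zero] at hdj
    obtain ⟨c, hc⟩ := hdj
    have hcpos : 0 ≤ c := by nlinarith
    have hc' : j = ((c.toNat * i' : Nat) : Int) := by
      push_cast [Int.toNat_of_nonneg hcpos]
      rw [hc]; ring
    rw [hc', PySem.List.slice_natCast_add, PySem.List.slice_to_natCast, beq_iff_eq]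
    exact hb c.toNat (by exact_mod_cast hc' ▸ hlt)

-- A's candidate test at i agrees with B's loop-body test at i, for 1 ≤ i ≤ n
theorem pvCond_eq (cycle : List Int) (i' : Nat) (hi : 0 < i') (hin : i' ≤ cycle.length) :
    ((PySem.Int.mod ((cycle.length : Int)) ((i' : Nat) : Int) == 0) &&
      (PySem.List.pyRange 0 (cycle.length : Int) ((i' : Nat) : Int)).all (fun j =>
         PySem.List.slice cycle (some j) (some (j + ((i' : Nat) : Int))) ==
           PySem.List.slice cycle none (some ((i' : Nat) : Int))))
    = ((PySem.Int.mod ((cycle.length : Int)) ((i' : Nat) : Int) == 0) &&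
       (PySem.List.slice cycle (some ((i' : Nat) : Int)) none ==
        PySem.List.slice cycle none (some (-((i' : Nat) : Int))))) := by
  rw [Bool.eq_iff_iff, pvP_iff cycle i' hi, Bool.and_eq_true]
  rw [PySem.List.slice_from_natCast, PySem.List.slice_to_neg_natCast _ _ hi]
  simp only [beq_iff_eq]
  have hmodiff : (PySem.Int.mod ((cycle.length : Int)) ((i' : Nat) : Int) = 0)
      ↔ i' ∣ cycle.length := by
    rw [PySem.Int.mod_natCast]
    exact_mod_cast Nat.dvd_iff_mod_eq_zero.symm
  constructor
  · rintro ⟨hdvd, hb⟩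
    exact ⟨hmodiff.mpr hdvd, (pvOverlap_iff cycle i' hi hin hdvd).mpr hb⟩
  · rintro ⟨hmod, hov⟩
    have hdvd := hmodiff.mp hmod
    exact ⟨hdvd, (pvOverlap_iff cycle i' hi hin hdvd).mp hov⟩

-- B's loop, related to A's first-match search over the remaining candidates
theorem pvScan_eq (cycle : List Int) :
    ∀ (d i' : Nat), cycle.length - i' = d → 1 ≤ i' → i' ≤ cycle.length →
    cycleLengthScan cycle cycle.length i' =
      (match (PySem.List.pyRange ((i' : Nat) : Int) ((cycle.length : Int) + 1) 1).find? (fun i =>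
          (PySem.Int.mod ((cycle.length : Int)) i == 0) &&
          (PySem.List.pyRange 0 ((cycle.length : Int)) i).all (fun j =>
            PySem.List.slice cycle (some j) (some (j + i)) ==
              PySem.List.slice cycle none (some i))) with
       | some v => v
       | none => ((cycle.length : Int))) := by
  intro d
  induction d with
  | zero =>
    intro i' hd h1 hn
    have hi : i' = cycle.length := by omega
    rw [hi, cycleLengthScan.eq_def]
    simp only [lt_irrefl, if_false]
    rw [PySem.List.pyRange_one_cons (by omega : ((cycle.length : Nat) : Int) < (cycle.length : Int) + 1),
        PySem.List.pyRange_one_eq_nil (by omega)]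
    have htrue : ((PySem.Int.mod ((cycle.length : Int)) ((cycle.length : Nat) : Int) == 0) &&
      (PySem.List.pyRange 0 (cycle.length : Int) ((cycle.length : Nat) : Int)).all (fun j =>
         PySem.List.slice cycle (some j) (some (j + ((cycle.length : Nat) : Int))) ==
           PySem.List.slice cycle none (some ((cycle.length : Nat) : Int)))) = true := by
      rw [pvP_iff cycle cycle.length (by omega)]
      refine ⟨dvd_refl _, fun k hk => ?_⟩
      have hk0 : k = 0 := by nlinarith
      simp [hk0]
    rw [List.find?_cons_of_pos (by exact htrue)]
  | succ d ih =>
    intro i' hd h1 hn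
    have hlt : i' < cycle.length := by omega
    rw [cycleLengthScan.eq_def, if_pos hlt]
    rw [PySem.List.pyRange_one_cons (by
      have : ((i' : Nat) : Int) < (cycle.length : Int) := by exact_mod_cast hlt
      omega)]
    by_cases hc : ((PySem.Int.mod ((cycle.length : Int)) ((i' : Nat) : Int) == 0) &&
      (PySem.List.pyRange 0 (cycle.length : Int) ((i' : Nat) : Int)).all (fun j =>
         PySem.List.slice cycle (some j) (some (j + ((i' : Nat) : Int))) ==
           PySem.List.slice cycle none (some ((i' : Nat) : Int)))) = true
    · have hbc : ((PySem.Int.mod ((cycle.length : Nat) : Int) ((i' : Nat) : Int) == 0) &&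
          (PySem.List.slice cycle (some ((i' : Nat) : Int)) none ==
           PySem.List.slice cycle none (some (-((i' : Nat) : Int))))) = true := by
        rw [← pvCond_eq cycle i' (by omega) (by omega)]; exact hc
      rw [if_pos hbc, List.find?_cons_of_pos (by exact hc)]
    · have hbc : ¬ (((PySem.Int.mod ((cycle.length : Nat) : Int) ((i' : Nat) : Int) == 0) &&
          (PySem.List.slice cycle (some ((i' : Nat) : Int)) none ==
           PySem.List.slice cycle none (some (-((i' : Nat) : Int))))) = true) := by
        rw [← pvCond_eq cycle i' (by omega) (by omega)]; exact hc
      rw [if_neg hbc, List.find?_cons_of_neg (by simpa using hc)]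
      have := ih (i' + 1) (by omega) (by omega) (by omega)
      rw [this]
      norm_num

-- ===== VERDICT (by name: the statement is the Claim_ definition above) =====
theorem cycleLength_spec : Claim_equal_cycleLength := by
  intro cycle _
  unfold Spec_cycleLength cycleLength cycleLength_alt
  simp only [PySem.List.len_eq]
  rcases Nat.eq_zero_or_pos cycle.length with h0 | hpos
  · have hnil : cycle = [] := List.eq_nil_of_length_eq_zero h0
    subst hnil
    rw [cycleLengthScan.eq_def]
    simp [PySem.List.pyRange_one_eq_nil]
  · rw [pvScan_eq cycle (cycle.length - 1) 1 rfl le_rfl hpos]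
    norm_num
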